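-- pv_equiv track=rewrite | github.com/kudrmax/algorithmic-problems | yandex/4D.py | calc_h
-- ===== SOURCE A (Python) =====
-- def calc_h(w, arr):
--     x, y = 0, 0
--     for word in arr:
--         if x != 0:
--             x += 1
--         if x + word > w:
--             x = 0
--             y += 1
--         if word > w:
--             return -1
--         x += word
--     return y + 1
-- ===== SOURCE B (Python) =====
-- def calc_h(w, arr):
--     if any(word > w for word in arr):
--         return -1
--     count, i, n = 0, 0, len(arr)
--     while i < n:  # one outer iteration per output line
--         fill = arr[i]
--         i += 1
--         while i < n:  # pack as many further words as fit on this line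
--             f = fill + 1 if fill != 0 else fill
--             if f + arr[i] > w:
--                 break
--             fill = f + arr[i]
--             i += 1
--         count += 1
--     return max(1, count)
-- ===== Notes on version B (the rewrite author's own statement) =====
-- stated objective: alternative
-- what changed: B first validates in a separate scan (any over-wide word returns -1), then counts by a line-at-a-time decomposition: an outer loop emits one line per iteration while an inner loop packs the maximal prefix of remaining words into that line, instead of A's flat single loop threading a fill counter and a line counter with an in-loop -1 return.
import Mathlib
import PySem

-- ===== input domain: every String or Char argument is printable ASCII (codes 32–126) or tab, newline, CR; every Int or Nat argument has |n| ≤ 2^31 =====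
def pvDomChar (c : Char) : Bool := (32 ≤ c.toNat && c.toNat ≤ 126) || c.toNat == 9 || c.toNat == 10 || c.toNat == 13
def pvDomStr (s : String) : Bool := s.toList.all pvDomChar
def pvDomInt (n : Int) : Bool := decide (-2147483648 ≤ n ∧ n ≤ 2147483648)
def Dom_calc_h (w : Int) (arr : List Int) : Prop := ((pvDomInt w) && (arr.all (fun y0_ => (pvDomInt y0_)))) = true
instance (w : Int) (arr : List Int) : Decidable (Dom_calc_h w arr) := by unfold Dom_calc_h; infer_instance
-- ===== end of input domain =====

-- B validates over-wide words in a separate scan, then counts lines one line at a time: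
-- an outer loop emits a line per iteration while an inner loop packs the words that fit,
-- instead of A's flat two-counter loop; objective: alternative decomposition (same O(n) cost).

-- ===== PORT A =====
def calcA_go (w : Int) : List Int → Int → Int → Int
  | [], _, y => y + 1
  | word :: rest, x, y =>
    let x1 := if x ≠ 0 then x + 1 else x
    let x2 := if x1 + word > w then 0 else x1
    let y2 := if x1 + word > w then y + 1 else y
    if word > w then -1
    else calcA_go w rest (x2 + word) y2

def calc_h (w : Int) (arr : List Int) : Int := calcA_go w arr 0 0

-- ===== PORT B =====
-- Source B's inner while loop: extend the current line (fill) while the next word still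
-- fits; returns the words left over for the following lines (Source B's arr[i:] suffix)
def packLine (w : Int) (fill : Int) : List Int → List Int
  | [] => []
  | word :: rest =>
    let f := if fill ≠ 0 then fill + 1 else fill
    if f + word > w then word :: rest
    else packLine w (f + word) rest

theorem packLine_length_le (w fill : Int) (l : List Int) :
    (packLine w fill l).length ≤ l.length := by
  induction l generalizing fill with
  | nil => simp [packLine]
  | cons word rest ih =>
    simp only [packLine]
    split <;> split
    · simp
    · exact le_trans (ih _) (Nat.le_succ _)
    · simp
    · exact le_trans (ih _) (Nat.le_succ _)

-- Source B's outer while loop: one recursive step per output line, accumulating the count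
def linesB (w : Int) : List Int → Int
  | [] => 0
  | word :: rest => 1 + linesB w (packLine w word rest)
termination_by l => l.length
decreasing_by
  simpa using Nat.lt_succ_of_le (packLine_length_le w word rest)

def calc_h_alt (w : Int) (arr : List Int) : Int :=
  if arr.any (fun word => decide (word > w)) then -1
  else max 1 (linesB w arr)

-- ===== PRECONDITION & SPEC =====
def Spec_calc_h (w : Int) (arr : List Int) (out : Int) : Prop := out = calc_h_alt w arr
instance (w : Int) (arr : List Int) (out : Int) : Decidable (Spec_calc_h w arr out) := by unfold Spec_calc_h; infer_instance

-- ===== CLAIM (what is proved, stated in full; the proofs are below) =====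
def Claim_equal_calc_h : Prop := ∀ (w : Int) (arr : List Int), Dom_calc_h w arr → Spec_calc_h w arr (calc_h w arr)

-- ===== LEMMAS AND PROOFS =====

theorem linesB_nil (w : Int) : linesB w [] = 0 := by rw [linesB]

theorem linesB_cons (w word : Int) (rest : List Int) :
    linesB w (word :: rest) = 1 + linesB w (packLine w word rest) := by rw [linesB]

-- A returns -1 as soon as some word exceeds w
theorem go_neg (w : Int) (arr : List Int) (h : ∃ word ∈ arr, word > w) :
    ∀ (x y : Int), calcA_go w arr x y = -1 := by
  induction arr with
  | nil => simp at h
  | cons word rest ih =>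
    intro x y
    simp only [calcA_go]
    by_cases hw : word > w
    · simp [hw]
    · simp only [hw, if_false]
      rcases h with ⟨u, hu, hgt⟩
      rcases List.mem_cons.mp hu with rfl | hm
      · exact absurd hgt hw
      · exact ih ⟨u, hm, hgt⟩ _ _

theorem linesB_nonneg (w : Int) : ∀ (n : Nat) (l : List Int), l.length ≤ n → 0 ≤ linesB w l := by
  intro n
  induction n with
  | zero =>
    intro l hl
    have : l = [] := List.eq_nil_of_length_eq_zero (Nat.le_zero.mp hl)
    simp [this, linesB_nil]
  | succ n ih =>
    intro l hl
    cases l with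
    | nil => simp [linesB_nil]
    | cons word rest =>
      rw [linesB_cons]
      have hle : (packLine w word rest).length ≤ n :=
        le_trans (packLine_length_le w word rest) (by simpa using hl)
      have := ih _ hle
      omega

-- the key invariant: with all words fitting, A's loop from fill `cur` counts the current
-- line plus B's recursively counted lines over the leftover words of the current line
theorem go_pos (w : Int) (arr : List Int) (h : ∀ word ∈ arr, ¬ word > w) :
    ∀ (cur y : Int),
      calcA_go w arr cur y = y + 1 + linesB w (packLine w cur arr) := by
  induction arr with
  | nil => intro cur y; simp [calcA_go, packLine, linesB_nil]
  | cons word rest ih =>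
    intro cur y
    have hw : ¬ word > w := h word (List.mem_cons_self ..)
    have hr : ∀ u ∈ rest, ¬ u > w := fun u hu => h u (List.mem_cons_of_mem _ hu)
    simp only [calcA_go, packLine, hw, if_false]
    by_cases hov : (if cur ≠ 0 then cur + 1 else cur) + word > w
    · simp only [hov, if_true, zero_add, linesB_cons]
      rw [ih hr word (y + 1)]
      ring
    · simp only [hov, if_false]
      exact ih hr _ y

-- ===== VERDICT (by name: the statement is the Claim_ definition above) =====
theorem calc_h_spec : Claim_equal_calc_h := by
  intro w arr _
  unfold Spec_calc_h calc_h calc_h_alt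
  by_cases h : arr.any (fun word => decide (word > w))
  · rw [if_pos h]
    exact go_neg w arr (by simpa using h) 0 0
  · rw [if_neg (Bool.not_eq_true _ ▸ h)]
    have hall : ∀ word ∈ arr, ¬ word > w := by simpa using h
    rw [go_pos w arr hall 0 0]
    cases arr with
    | nil => simp [packLine, linesB_nil]
    | cons word rest =>
      have hw : ¬ word > w := hall word (List.mem_cons_self ..)
      have hpk : packLine w 0 (word :: rest) = packLine w word rest := by
        simp [packLine, hw]
      rw [hpk, linesB_cons]
      have h0 := linesB_nonneg w (packLine w word rest).length (packLine w word rest) le_rfl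
      omega
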